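-- pv_equiv track=rewrite | github.com/castorx9000/UnbettingFootball | Referee/Referees2.0.py | find_index_before_half
-- ===== SOURCE A (Python) =====
-- def find_index_before_half(reference):
--     index = 21
--     escenario = 52
--     flag = True
--
--     while flag:
--         if reference < escenario:
--             flag = False
--         else:
--             escenario += 2
--             index -= 1
--
--     return index
-- ===== SOURCE B (Python) =====
-- def find_index_before_half(reference):
--     if reference < 52:
--         return 21
--     return 20 - (reference - 52) // 2
-- ===== Notes on version B (the rewrite author's own statement) =====
-- stated objective: faster
-- what changed: Replaced the step-by-2 while loop with a closed-form floor-division formula computing the index directly.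
import Mathlib
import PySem

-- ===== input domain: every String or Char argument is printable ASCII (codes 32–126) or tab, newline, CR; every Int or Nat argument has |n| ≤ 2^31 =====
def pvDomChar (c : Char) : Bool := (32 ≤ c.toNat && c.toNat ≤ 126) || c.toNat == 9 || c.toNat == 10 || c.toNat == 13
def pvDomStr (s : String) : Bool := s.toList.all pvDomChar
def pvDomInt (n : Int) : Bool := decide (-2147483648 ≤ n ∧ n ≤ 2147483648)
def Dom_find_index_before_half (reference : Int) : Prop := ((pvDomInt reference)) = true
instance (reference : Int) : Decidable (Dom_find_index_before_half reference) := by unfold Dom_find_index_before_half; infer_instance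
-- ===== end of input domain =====

-- B replaces A's step-by-2 while loop by a closed-form floor-division formula (faster, O(1) vs O(reference)).
-- ===== PORT A =====
-- the while-flag loop of A: state (escenario, index); flag becomes False exactly when
-- reference < escenario.  fuel is only an upper bound on the number of iterations
-- ((reference - 50).toNat + 1 always suffices), so the recursion is structural.
def fibhLoop : Nat → Int → Int → Int → Int
  | 0, _, _, index => index
  | fuel + 1, reference, escenario, index =>
      if reference < escenario then index
      else fibhLoop fuel reference (escenario + 2) (index - 1)

def find_index_before_half (reference : Int) : Int :=
  fibhLoop ((reference - 50).toNat + 1) reference 52 21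

-- ===== PORT B =====
def find_index_before_half_alt (reference : Int) : Int :=
  if reference < 52 then 21
  else 20 - PySem.Int.floordiv (reference - 52) 2

-- ===== PRECONDITION & SPEC =====
def Spec_find_index_before_half (reference : Int) (out : Int) : Prop := out = find_index_before_half_alt reference
instance (reference : Int) (out : Int) : Decidable (Spec_find_index_before_half reference out) := by unfold Spec_find_index_before_half; infer_instance

-- ===== CLAIM (what is proved, stated in full; the proofs are below) =====
def Claim_equal_find_index_before_half : Prop := ∀ (reference : Int), Dom_find_index_before_half reference → Spec_find_index_before_half reference (find_index_before_half reference)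

-- ===== LEMMAS AND PROOFS =====

-- with the flag about to drop, any fuel returns index unchanged
theorem fibhLoop_stop (fuel : Nat) (reference escenario index : Int)
    (h : reference < escenario) : fibhLoop fuel reference escenario index = index := by
  cases fuel <;> simp [fibhLoop, h]

-- closed form of the loop, for any starting state and sufficient fuel
theorem fibhLoop_eq (fuel : Nat) (reference escenario index : Int)
    (hn : (reference - escenario).toNat < fuel) :
    fibhLoop fuel reference escenario index =
      if reference < escenario then index
      else index - (PySem.Int.floordiv (reference - escenario) 2 + 1) := by
  induction fuel generalizing escenario index with
  | zero => omega
  | succ fuel ih =>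
    rw [fibhLoop]
    by_cases h : reference < escenario
    · simp [h]
    · by_cases h2 : reference < escenario + 2
      · rw [if_neg h, fibhLoop_stop fuel reference (escenario + 2) (index - 1) h2,
            if_neg h]
        have hd : PySem.Int.floordiv (reference - escenario) 2 = 0 := by
          rw [PySem.Int.floordiv_eq_iff_of_pos] <;> omega
        omega
      · rw [ih (escenario + 2) (index - 1) (by omega)]
        simp [h, h2]
        omega

-- ===== VERDICT (by name: the statement is the Claim_ definition above) =====
theorem find_index_before_half_spec : Claim_equal_find_index_before_half := by
  intro reference _
  unfold Spec_find_index_before_half find_index_before_half find_index_before_half_alt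
  rw [fibhLoop_eq ((reference - 50).toNat + 1) reference 52 21 (by omega)]
  by_cases h : reference < 52
  · simp [h]
  · simp [h]
    omega
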